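-- pv_equiv track=rewrite | github.com/ahkelany/practical | tm_0n1n0n1n.py | tm_accepts_0n1n0n1n
-- ===== SOURCE A (Python) =====
-- def tm_accepts_0n1n0n1n(s: str) -> bool:
--     if not s:
--         return True  # حالة n=0 مقبولة (السلسلة الفارغة)
--
--     parts = []
--     i = 0
--     # تقسيم السلسلة إلى أجزاء من الحروف المتتالية وعددها
--     while i < len(s):
--         current_char = s[i]
--         count = 0
--         # لا حاجة لـ start_of_part_index هنا لأننا لا نستخدمه
--         while i < len(s) and s[i] == current_char:
--             count += 1
--             i += 1
--         # تأكد من أن الحرف هو '0' أو '1' فقط (إذا كانت اللغة تقتصر على هذه الرموز)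
--         if current_char not in ['0', '1']:
--             return False # حرف غير مسموح به في اللغة
--         parts.append((current_char, count))
--
--     # 1. التأكد من أن هناك بالضبط 4 أجزاء
--     if len(parts) != 4:
--         return False
--
--     # 2. استخراج الرموز والأعداد
--     symbols = [p[0] for p in parts]
--     counts = [p[1] for p in parts]
--
--     # 3. التأكد من أن تسلسل الرموز هو '0', '1', '0', '1'
--     if symbols != ['0', '1', '0', '1']:
--         return False
--
--     # 4. التأكد من أن جميع الأعداد (n) متساوية
--     # إذا كانت جميع الأعداد متساوية، فإن المجموعة set(counts) ستحتوي على عنصر واحد فقط.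
--     if len(set(counts)) != 1:
--         return False
--
--     # إذا وصلت إلى هنا، فكل الشروط متحققة
--     return True
-- ===== SOURCE B (Python) =====
-- def tm_accepts_0n1n0n1n(s: str) -> bool:
--     if len(s) % 4 != 0:
--         return False
--     n = len(s) // 4
--     return s == "0" * n + "1" * n + "0" * n + "1" * n
-- ===== Notes on version B (the rewrite author's own statement) =====
-- stated objective: simpler
-- what changed: Replaces run-length encoding into (char,count) parts plus checks on symbols and a set of counts by building the canonical string 0^n 1^n 0^n 1^n for n = len(s)//4 and comparing it to s directly.
import Mathlib
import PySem

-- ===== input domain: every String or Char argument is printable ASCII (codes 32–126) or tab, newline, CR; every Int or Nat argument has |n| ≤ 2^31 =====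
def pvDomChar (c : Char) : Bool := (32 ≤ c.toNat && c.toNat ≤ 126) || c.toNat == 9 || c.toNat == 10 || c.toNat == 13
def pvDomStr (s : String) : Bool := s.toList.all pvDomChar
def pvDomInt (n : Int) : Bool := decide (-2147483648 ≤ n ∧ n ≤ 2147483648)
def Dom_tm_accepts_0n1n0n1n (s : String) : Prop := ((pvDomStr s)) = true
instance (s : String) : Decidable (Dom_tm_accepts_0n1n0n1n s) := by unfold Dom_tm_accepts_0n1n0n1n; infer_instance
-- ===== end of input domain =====

-- B replaces A's run-length-encoding pass and checks on the runs by a direct comparison of s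
-- with the canonical string 0^n 1^n 0^n 1^n for n = len(s)//4; objective: simpler.

-- ===== PORT A =====
-- the while/while loop of A: split into maximal runs (char, count), None = the early 'return False'
-- on a character other than '0'/'1'
def pvBuildParts : List Char → Option (List (Char × Nat))
  | [] => some []
  | c :: rest =>
    if !(c == '0' || c == '1') then none
    else
      match pvBuildParts (rest.dropWhile (· == c)) with
      | none => none
      | some ps => some ((c, (rest.takeWhile (· == c)).length + 1) :: ps)
termination_by cs => cs.length
decreasing_by
  simp only [List.length_cons]
  have := List.length_dropWhile_le (· == c) rest
  omega

def tm_accepts_0n1n0n1n (s : String) : Bool :=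
  if s.toList.isEmpty then true
  else
    match pvBuildParts s.toList with
    | none => false
    | some parts =>
      if parts.length ≠ 4 then false
      else
        let symbols := parts.map Prod.fst
        let counts := parts.map Prod.snd
        if symbols ≠ ['0', '1', '0', '1'] then false
        else if (PySem.Set.ofList counts).length ≠ 1 then false
        else true

-- ===== PORT B =====
def pvCanonical (n : Nat) : List Char :=
  List.replicate n '0' ++ List.replicate n '1' ++ List.replicate n '0' ++ List.replicate n '1'

def tm_accepts_0n1n0n1n_alt (s : String) : Bool :=
  if s.toList.length % 4 ≠ 0 then false
  else s.toList == pvCanonical (s.toList.length / 4)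

-- ===== PRECONDITION & SPEC =====
def Spec_tm_accepts_0n1n0n1n (s : String) (out : Bool) : Prop := out = tm_accepts_0n1n0n1n_alt s
instance (s : String) (out : Bool) : Decidable (Spec_tm_accepts_0n1n0n1n s out) := by unfold Spec_tm_accepts_0n1n0n1n; infer_instance

-- ===== CLAIM (what is proved, stated in full; the proofs are below) =====
def Claim_equal_tm_accepts_0n1n0n1n : Prop := ∀ (s : String), Dom_tm_accepts_0n1n0n1n s → Spec_tm_accepts_0n1n0n1n s (tm_accepts_0n1n0n1n s)

-- ===== LEMMAS AND PROOFS =====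

-- a takeWhile (· == c) block is a replicate of c
lemma pv_takeWhile_replicate (c : Char) (l : List Char) :
    l.takeWhile (· == c) = List.replicate (l.takeWhile (· == c)).length c := by
  rw [List.eq_replicate_length]
  intro b hb
  have := List.mem_takeWhile_imp hb
  simpa using this

-- soundness: a successful run-length encoding flattens back to the input
lemma pvBuildParts_sound : ∀ (cs : List Char) (ps : List (Char × Nat)),
    pvBuildParts cs = some ps → cs = ps.flatMap (fun p => List.replicate p.2 p.1)
  | [], ps, h => by
    simp [pvBuildParts] at h; subst h; rfl
  | c :: rest, ps, h => by
    rw [pvBuildParts] at h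
    by_cases hc : (c == '0' || c == '1') = true
    · simp only [hc, Bool.not_true, if_false, Bool.false_eq_true] at h
      cases hrec : pvBuildParts (rest.dropWhile (· == c)) with
      | none => rw [hrec] at h; simp at h
      | some qs =>
        rw [hrec] at h
        simp only [Option.some.injEq] at h
        have ih := pvBuildParts_sound (rest.dropWhile (· == c)) qs hrec
        subst h
        simp only [List.flatMap_cons, List.replicate_succ]
        rw [← ih, ← pv_takeWhile_replicate]
        simp [List.takeWhile_append_dropWhile]
    · simp [hc] at h
termination_by cs => cs.length
decreasing_by
  have := List.length_dropWhile_le (· == c) rest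
  simp only [List.length_cons]
  omega

lemma pv_takeWhile_run (c : Char) (m : Nat) (rest : List Char)
    (h : rest.takeWhile (· == c) = []) :
    (List.replicate m c ++ rest).takeWhile (· == c) = List.replicate m c := by
  induction m with
  | zero => simpa using h
  | succ k ih => simp [List.replicate_succ, ih]

lemma pv_dropWhile_run (c : Char) (m : Nat) (rest : List Char)
    (h : rest.dropWhile (· == c) = rest) :
    (List.replicate m c ++ rest).dropWhile (· == c) = rest := by
  induction m with
  | zero => simpa using h
  | succ k ih => simp [List.replicate_succ, ih]

-- one step of the encoder on a leading run
lemma pvBuildParts_run (c : Char) (k : Nat) (rest : List Char)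
    (hc : (c == '0' || c == '1') = true)
    (ht : rest.takeWhile (· == c) = []) (hd : rest.dropWhile (· == c) = rest) :
    pvBuildParts (List.replicate (k + 1) c ++ rest) =
      (pvBuildParts rest).map (fun ps => (c, k + 1) :: ps) := by
  rw [List.replicate_succ, List.cons_append, pvBuildParts]
  rw [pv_takeWhile_run c k rest ht, pv_dropWhile_run c k rest hd]
  simp [hc, List.length_replicate]
  cases pvBuildParts rest <;> simp

lemma pvBuildParts_canonical (n : Nat) (hn : 1 ≤ n) :
    pvBuildParts (pvCanonical n) = some [('0', n), ('1', n), ('0', n), ('1', n)] := by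
  obtain ⟨k, rfl⟩ : ∃ k, n = k + 1 := ⟨n - 1, by omega⟩
  have h10 : ∀ l : List Char, ((List.replicate (k+1) '1' ++ l).takeWhile (· == '0') = [])
      ∧ ((List.replicate (k+1) '1' ++ l).dropWhile (· == '0') = List.replicate (k+1) '1' ++ l) := by
    intro l; constructor <;> simp [List.replicate_succ]
  have h01 : ∀ l : List Char, ((List.replicate (k+1) '0' ++ l).takeWhile (· == '1') = [])
      ∧ ((List.replicate (k+1) '0' ++ l).dropWhile (· == '1') = List.replicate (k+1) '0' ++ l) := by
    intro l; constructor <;> simp [List.replicate_succ]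
  unfold pvCanonical
  rw [List.append_assoc, List.append_assoc]
  rw [pvBuildParts_run '0' k _ (by decide) (h10 _).1 (h10 _).2]
  rw [pvBuildParts_run '1' k _ (by decide) (h01 _).1 (h01 _).2]
  rw [pvBuildParts_run '0' k _ (by decide) (by simp [List.replicate_succ]) (by simp [List.replicate_succ])]
  have h4 : pvBuildParts (List.replicate (k+1) '1') = some [('1', k+1)] := by
    rw [show List.replicate (k+1) '1' = List.replicate (k+1) '1' ++ [] by simp,
      pvBuildParts_run '1' k [] (by decide) rfl rfl]
    simp [pvBuildParts]
  rw [h4]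
  rfl

-- Python's len(set([a,b,c,d])) == 1
lemma pv_set4 (a b c d : Nat) :
    (PySem.Set.ofList [a, b, c, d]).length = 1 ↔ (b = a ∧ c = a ∧ d = a) := by
  simp only [PySem.Set.ofList, PySem.Set.add, PySem.Set.contains, List.foldl]
  split_ifs <;> simp_all <;> omega

lemma pv_main (s : String) : tm_accepts_0n1n0n1n s = tm_accepts_0n1n0n1n_alt s := by
  have key : tm_accepts_0n1n0n1n s = true ↔ tm_accepts_0n1n0n1n_alt s = true := by
    constructor
    · intro hA
      unfold tm_accepts_0n1n0n1n at hA
      by_cases hemp : s.toList.isEmpty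
      · have : s.toList = [] := by simpa [List.isEmpty_iff] using hemp
        simp [tm_accepts_0n1n0n1n_alt, this, pvCanonical]
      · rw [if_neg hemp] at hA
        cases hbp : pvBuildParts s.toList with
        | none => rw [hbp] at hA; simp at hA
        | some ps =>
          rw [hbp] at hA
          dsimp only at hA
          have hflat := pvBuildParts_sound s.toList ps hbp
          -- extract the checks
          by_cases hlen : ps.length ≠ 4
          · simp [hlen] at hA
          rw [if_neg hlen] at hA
          by_cases hsym : ps.map Prod.fst ≠ ['0', '1', '0', '1']
          · simp [hsym] at hA
          push_neg at hsym
          by_cases hcnt : (PySem.Set.ofList (ps.map Prod.snd)).length ≠ 1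
          · simp [hsym, hcnt] at hA
          push_neg at hcnt
          -- decompose ps into four pairs
          push_neg at hlen
          obtain ⟨a1, a2, a3, a4, rfl⟩ : ∃ a1 a2 a3 a4, ps = [a1, a2, a3, a4] := by
            rcases ps with _ | ⟨x1, _ | ⟨x2, _ | ⟨x3, _ | ⟨x4, _ | ⟨x5, t⟩⟩⟩⟩⟩ <;>
              simp at hlen
            exact ⟨x1, x2, x3, x4, rfl⟩
          obtain ⟨c1, a⟩ := a1; obtain ⟨c2, b⟩ := a2
          obtain ⟨c3, c⟩ := a3; obtain ⟨c4, d⟩ := a4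
          simp only [List.map_cons, List.map_nil, List.cons.injEq, and_true] at hsym
          obtain ⟨rfl, rfl, rfl, rfl⟩ := hsym
          simp only [List.map_cons, List.map_nil] at hcnt
          obtain ⟨rfl, rfl, rfl⟩ := (pv_set4 a b c d).mp hcnt
          have hs : s.toList = pvCanonical d := by
            rw [hflat]; simp [pvCanonical, List.flatMap_cons]
          have hlen4 : s.toList.length = 4 * d := by
            rw [hs]; simp [pvCanonical]; omega
          unfold tm_accepts_0n1n0n1n_alt
          rw [hlen4]
          simp [Nat.mul_mod_right, Nat.mul_div_cancel_left, hs]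
    · intro hB
      unfold tm_accepts_0n1n0n1n_alt at hB
      by_cases hmod : s.toList.length % 4 ≠ 0
      · rw [if_pos hmod] at hB; exact absurd hB (by decide)
      rw [if_neg hmod] at hB
      push_neg at hmod
      have hs : s.toList = pvCanonical (s.toList.length / 4) := by
        simpa using hB
      by_cases hemp : s.toList.isEmpty
      · simp [tm_accepts_0n1n0n1n, hemp]
      · have hne : s.toList ≠ [] := by simpa [List.isEmpty_iff] using hemp
        have hlpos : 1 ≤ s.toList.length / 4 := by
          have h0 : s.toList.length ≠ 0 := by simpa using hne
          omega
        unfold tm_accepts_0n1n0n1n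
        rw [if_neg hemp, hs, pvBuildParts_canonical _ hlpos]
        simp [pv_set4]
  cases hA : tm_accepts_0n1n0n1n s <;> cases hB : tm_accepts_0n1n0n1n_alt s <;> simp_all

-- ===== VERDICT (by name: the statement is the Claim_ definition above) =====
theorem tm_accepts_0n1n0n1n_spec : Claim_equal_tm_accepts_0n1n0n1n := by
  intro s _
  exact pv_main s
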